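-- pv_equiv track=rewrite | github.com/SokolowskiMik/pp1 | 13-Test3/p4.py | f
-- ===== SOURCE A (Python) =====
-- def f(d):
--     cars = dict()
--     for car in d:
--         cars[car[0]] = car[1]
--     lst = []
--     for c in cars:
--         if cars.get(c) == 'in':
--             lst.append(c)
--     return sorted(lst)
-- ===== SOURCE B (Python) =====
-- def f(d):
--     seen = set()
--     res = []
--     for car in reversed(d):
--         if car[0] not in seen:
--             seen.add(car[0])
--             if car[1] == 'in':
--                 res.append(car[0])
--     return sorted(res)
-- ===== Notes on version B (the rewrite author's own statement) =====
-- stated objective: alternative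
-- what changed: Replaces the dict-of-latest-statuses plus a second scan over its keys by a single reverse pass with a seen-set that keeps the first reverse occurrence (= latest status) of each car id.
import Mathlib
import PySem

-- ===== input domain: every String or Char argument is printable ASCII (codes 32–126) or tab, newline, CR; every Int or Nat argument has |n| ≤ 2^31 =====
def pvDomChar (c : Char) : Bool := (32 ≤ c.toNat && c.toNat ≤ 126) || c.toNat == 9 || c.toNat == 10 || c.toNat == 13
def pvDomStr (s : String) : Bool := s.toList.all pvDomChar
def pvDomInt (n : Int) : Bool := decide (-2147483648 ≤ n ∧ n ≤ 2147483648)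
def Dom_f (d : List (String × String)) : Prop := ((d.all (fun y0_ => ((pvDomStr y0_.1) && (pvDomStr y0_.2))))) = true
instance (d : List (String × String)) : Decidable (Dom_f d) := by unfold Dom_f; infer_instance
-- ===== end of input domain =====

-- B replaces A's latest-status dict plus key re-scan by one reverse pass with a seen-set (alternative decomposition, same cost).

-- ===== PORT A =====
def f (d : List (String × String)) : List String :=
  let cars := d.foldl (fun D car => D.insert car.1 car.2) (PySem.Dict.empty : PySem.Dict String String)
  let lst := cars.keys.foldl (fun acc c => if cars.get? c == some "in" then acc ++ [c] else acc) ([] : List String)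
  PySem.List.sorted lst (fun x => x) false

-- ===== PORT B =====
def fAltStep (p : PySem.Set String × List String) (car : String × String) :
    PySem.Set String × List String :=
  if PySem.Set.contains p.1 car.1 then p
  else (PySem.Set.add p.1 car.1, if car.2 == "in" then p.2 ++ [car.1] else p.2)

def f_alt (d : List (String × String)) : List String :=
  let st := d.reverse.foldl fAltStep ((PySem.Set.empty : PySem.Set String), ([] : List String))
  PySem.List.sorted st.2 (fun x => x) false

-- ===== PRECONDITION & SPEC =====
def Spec_f (d : List (String × String)) (out : List String) : Prop := out = f_alt d
instance (d : List (String × String)) (out : List String) : Decidable (Spec_f d out) := by unfold Spec_f; infer_instance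

-- ===== CLAIM (what is proved, stated in full; the proofs are below) =====
def Claim_equal_f : Prop := ∀ (d : List (String × String)), Dom_f d → Spec_f d (f d)

-- ===== LEMMAS AND PROOFS =====

lemma step_mem (s : PySem.Set String) (r : List String) (car : String × String)
    (hc : car.1 ∈ s) : fAltStep (s, r) car = (s, r) := by
  have h : PySem.Set.contains s car.1 = true := (PySem.Set.contains_iff _ _).mpr hc
  simp only [fAltStep, h, if_true]

lemma step_new (s : PySem.Set String) (r : List String) (car : String × String)
    (hc : car.1 ∉ s) :
    fAltStep (s, r) car = (PySem.Set.add s car.1, if car.2 == "in" then r ++ [car.1] else r) := by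
  have h : ¬ (PySem.Set.contains s car.1 = true) :=
    fun h => hc ((PySem.Set.contains_iff _ _).mp h)
  simp only [fAltStep]
  rw [if_neg h]

-- A's dict holds, for each key, the value of its LAST occurrence in d.
lemma get?_foldl_insert_last (l : List (String × String)) (D : PySem.Dict String String) (x : String) :
    (l.foldl (fun D car => D.insert car.1 car.2) D).get? x =
      (match l.reverse.find? (fun car => car.1 == x) with
        | some car => some car.2
        | none => D.get? x) := by
  induction l generalizing D with
  | nil => simp
  | cons car t ih =>
    simp only [List.foldl_cons, ih, List.reverse_cons, List.find?_append]
    cases h : t.reverse.find? (fun car => car.1 == x) with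
    | some c => simp
    | none =>
      by_cases hx : car.1 = x
      · simp [hx, PySem.Dict.get?_insert_self]
      · simp [hx, PySem.Dict.get?_insert_of_ne D car.2 (Ne.symm hx)]

-- Membership in B's accumulated result list.
lemma mem_fAlt_foldl (l : List (String × String)) (s : PySem.Set String) (r : List String)
    (x : String) :
    x ∈ (l.foldl fAltStep (s, r)).2 ↔
      x ∈ r ∨ (x ∉ s ∧ (l.find? (fun car => car.1 == x)).map (·.2) = some "in") := by
  induction l generalizing s r with
  | nil => simp
  | cons car t ih =>
    simp only [List.foldl_cons]
    by_cases hcs : car.1 ∈ s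
    · rw [step_mem s r car hcs, ih]
      by_cases hx : car.1 = x
      · subst hx
        simp [hcs]
      · simp [hx]
    · rw [step_new s r car hcs, ih]
      by_cases hx : car.1 = x
      · subst hx
        by_cases hv : car.2 = "in" <;>
          simp [hv, hcs]
      · have hadd : x ∈ PySem.Set.add s car.1 ↔ x ∈ s := by
          simp [PySem.Set.mem_add, Ne.symm hx]
        by_cases hv : car.2 = "in" <;>
          simp [hx, hv, hadd, Ne.symm hx]

-- B's accumulated result list stays duplicate-free.
lemma nodup_fAlt_foldl (l : List (String × String)) (s : PySem.Set String) (r : List String)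
    (hr : r.Nodup) (hsub : ∀ x ∈ r, x ∈ s) :
    (l.foldl fAltStep (s, r)).2.Nodup := by
  induction l generalizing s r with
  | nil => exact hr
  | cons car t ih =>
    simp only [List.foldl_cons]
    by_cases hcs : car.1 ∈ s
    · rw [step_mem s r car hcs]
      exact ih s r hr hsub
    · rw [step_new s r car hcs]
      by_cases hv : car.2 = "in"
      · simp only [hv]
        refine ih _ _ ?_ ?_
        · simp [List.nodup_append, hr]
          intro a ha e
          exact hcs (e ▸ hsub a ha)
        · intro x hx
          rcases List.mem_append.mp hx with h | h
          · exact (PySem.Set.mem_add _ _ _).mpr (Or.inl (hsub _ h))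
          · simp at h; subst h; exact (PySem.Set.mem_add _ _ _).mpr (Or.inr rfl)
      · have hv' : (car.2 == "in") = false := by simp [hv]
        simp only [hv']
        rw [if_neg (by simp)]
        exact ih _ _ hr (fun x hx => (PySem.Set.mem_add _ _ _).mpr (Or.inl (hsub x hx)))

-- ===== VERDICT (by name: the statement is the Claim_ definition above) =====
theorem f_spec : Claim_equal_f := by
  intro d _
  unfold Spec_f f f_alt
  simp only []
  set cars := d.foldl (fun D car => D.insert car.1 car.2) (PySem.Dict.empty : PySem.Dict String String) with hcars
  rw [PySem.List.foldl_append_if_eq_filter]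
  apply (PySem.List.sorted_id_eq_sorted_id_iff_perm _ _).mpr
  have hkeys : cars.keys.Nodup := by
    rw [hcars]
    exact PySem.Dict.nodup_keys_foldl_insert_key d Prod.fst (fun _ car => car.2) _
      PySem.Dict.nodup_keys_empty
  apply (List.perm_ext_iff_of_nodup (hkeys.filter _)
    (nodup_fAlt_foldl _ _ _ List.nodup_nil (by simp))).mpr
  intro x
  rw [List.mem_filter, mem_fAlt_foldl]
  have hget : cars.get? x =
      (match d.reverse.find? (fun car => car.1 == x) with
        | some car => some car.2
        | none => none) := by
    rw [hcars, get?_foldl_insert_last]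
    cases d.reverse.find? (fun car => car.1 == x) <;> simp
  constructor
  · rintro ⟨hmem, hp⟩
    have : cars.get? x = some "in" := by simpa using hp
    rw [hget] at this
    refine Or.inr ⟨by simp, ?_⟩
    cases h : d.reverse.find? (fun car => car.1 == x) with
    | none => rw [h] at this; simp at this
    | some c => rw [h] at this; simp at this ⊢; exact this
  · rintro (h | ⟨-, h⟩)
    · simp at h
    · have : cars.get? x = some "in" := by
        rw [hget]
        cases hf : d.reverse.find? (fun car => car.1 == x) with
        | none => rw [hf] at h; simp at h
        | some c => rw [hf] at h; simp at h ⊢; exact h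
      refine ⟨?_, by simpa using this⟩
      by_contra hmem
      rw [← PySem.Dict.get?_eq_none_iff_not_mem_keys] at hmem
      rw [hmem] at this; simp at this
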